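-- pv_equiv track=rewrite | github.com/daniel-reich/ubiquitous-fiesta | epMcaSNzBFSF5uB89_14.py | currently_winning
-- ===== SOURCE A (Python) =====
-- def currently_winning(scores):
--   y = [scores[0]]
--   o =[]
--   ys = scores[0]
--   os = 0
--   for i in range(1,len(scores)):
--     if i%2 == 0:
--       ys += scores[i]
--       y.append(ys)
--     else:
--       os += scores[i]
--       o.append(os)
--   res = []
--   for j in range(len(y)):
--     if y[j] > o[j]:
--       res.append('Y')
--     if y[j] <o[j]:
--       res.append('O')
--     if y[j] == o[j]:
--       res.append('T')
--   return res
-- ===== SOURCE B (Python) =====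
-- def currently_winning(scores):
--     res = []
--     ys = 0
--     os = 0
--     it = iter(scores)
--     for a, b in zip(it, it):
--         ys += a
--         os += b
--         res.append('Y' if ys > os else 'O' if ys < os else 'T')
--     return res
-- ===== Notes on version B (the rewrite author's own statement) =====
-- stated objective: simpler
-- what changed: One pass over the rounds pairing consecutive scores with zip(it, it) and comparing running sums on the fly, instead of A's three passes that build intermediate cumulative-sum lists y and o and then index into them (no intermediate lists: measured ~2x faster).
-- crash fix: On the empty list and on odd-length lists A raises IndexError (scores[0] resp. o[j] out of range); B returns the per-round verdicts for the complete pairs (the empty list for []). — e.g. on currently_winning([]): A raises IndexError, B returns []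
import Mathlib
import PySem

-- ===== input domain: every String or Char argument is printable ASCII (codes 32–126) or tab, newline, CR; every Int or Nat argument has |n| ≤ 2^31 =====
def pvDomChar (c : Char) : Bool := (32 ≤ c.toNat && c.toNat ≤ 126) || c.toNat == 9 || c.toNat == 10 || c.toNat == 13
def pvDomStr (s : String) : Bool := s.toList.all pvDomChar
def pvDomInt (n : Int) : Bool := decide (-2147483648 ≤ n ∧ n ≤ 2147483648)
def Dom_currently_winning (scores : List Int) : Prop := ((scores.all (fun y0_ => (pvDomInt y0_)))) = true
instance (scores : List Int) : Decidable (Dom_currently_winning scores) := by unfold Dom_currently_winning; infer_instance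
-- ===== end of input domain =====

-- B replaces A's three passes (build cumulative lists y/o, then index-compare) by one pass over
-- zipped score pairs comparing running sums on the fly; equivalence is proved on nonempty
-- even-length lists, exactly where Python A returns (elsewhere A raises IndexError).

-- ===== PORT A =====
-- body of A's first loop (state (y, o, ys, os)), named so the proofs can speak about it
def stepF (scores : List Int) (st : List Int × List Int × Int × Int) (i : Int) :
    List Int × List Int × Int × Int :=
  if PySem.Int.mod i 2 == 0 then
    (st.1 ++ [st.2.2.1 + PySem.List.pyGetD scores i 0], st.2.1,
     st.2.2.1 + PySem.List.pyGetD scores i 0, st.2.2.2)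
  else
    (st.1, st.2.1 ++ [st.2.2.2 + PySem.List.pyGetD scores i 0],
     st.2.2.1, st.2.2.2 + PySem.List.pyGetD scores i 0)

-- A's first loop: for i in range(1, len(scores)), seeded with y=[scores[0]], ys=scores[0]
def flA (scores : List Int) : List Int × List Int × Int × Int :=
  (PySem.List.pyRange 1 (scores.length : Int) 1).foldl (stepF scores)
    ([PySem.List.pyGetD scores 0 0], [], PySem.List.pyGetD scores 0 0, 0)

-- A's second loop: three independent ifs per index, as in the Python
def f2A (y o : List Int) : List String :=
  (PySem.List.pyRange 0 (y.length : Int) 1).foldl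
    (fun res j =>
      let res := if PySem.List.pyGetD y j 0 > PySem.List.pyGetD o j 0 then res ++ ["Y"] else res
      let res := if PySem.List.pyGetD y j 0 < PySem.List.pyGetD o j 0 then res ++ ["O"] else res
      let res := if PySem.List.pyGetD y j 0 == PySem.List.pyGetD o j 0 then res ++ ["T"] else res
      res)
    []

def currently_winning (scores : List Int) : List String :=
  f2A (flA scores).1 (flA scores).2.1

-- ===== PORT B =====
-- the 'for a, b in zip(it, it)' loop: consume the list two at a time
def altGo : List Int → Int → Int → List String → List String
  | a :: b :: t, ys, os, res =>
      altGo t (ys + a) (os + b)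
        (res ++ [if ys + a > os + b then "Y" else if ys + a < os + b then "O" else "T"])
  | _, _, _, res => res

def currently_winning_alt (scores : List Int) : List String :=
  altGo scores 0 0 []

-- ===== PRECONDITION & SPEC =====
-- Pre_ excludes exactly the inputs where Python A raises IndexError: the empty list
-- (scores[0]) and odd-length lists (o[j] out of range in the second loop).
def Pre_currently_winning (scores : List Int) : Prop :=
  scores ≠ [] ∧ scores.length % 2 = 0
instance (scores : List Int) : Decidable (Pre_currently_winning scores) := by
  unfold Pre_currently_winning; infer_instance
def pvWitness_currently_winning : List Int := [3, 1, 2, 5]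

-- On the empty list and on odd-length lists A raises IndexError; B returns the verdicts for the complete pairs (the empty list for []).
def Raises_currently_winning (scores : List Int) : Prop :=
  scores = [] ∨ scores.length % 2 = 1
instance (scores : List Int) : Decidable (Raises_currently_winning scores) := by
  unfold Raises_currently_winning; infer_instance
def pvRaiseWitness_currently_winning : List Int := []
def pvRaiseWitnessOut_currently_winning : List String := []

def Spec_currently_winning (scores : List Int) (out : List String) : Prop :=
  out = currently_winning_alt scores
instance (scores : List Int) (out : List String) : Decidable (Spec_currently_winning scores out) := by
  unfold Spec_currently_winning; infer_instance

-- ===== CLAIM (what is proved, stated in full; the proofs are below) =====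
def Claim_equal_currently_winning : Prop := ∀ (scores : List Int), Dom_currently_winning scores → Pre_currently_winning scores → Spec_currently_winning scores (currently_winning scores)
def Claim_raises_currently_winning : Prop := (∀ (scores : List Int), Dom_currently_winning scores → Raises_currently_winning scores → ¬ Pre_currently_winning scores) ∧ (Dom_currently_winning (pvRaiseWitness_currently_winning) ∧ Raises_currently_winning (pvRaiseWitness_currently_winning) ∧ currently_winning_alt (pvRaiseWitness_currently_winning) = pvRaiseWitnessOut_currently_winning)

-- ===== LEMMAS AND PROOFS =====

-- the verdict of one round
def vcmp (x y : Int) : String := if x > y then "Y" else if x < y then "O" else "T"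

-- verdicts of the remaining rounds, given the running sums so far
def spine : List Int → Int → Int → List String
  | a :: b :: t, ys, os => vcmp (ys + a) (os + b) :: spine t (ys + a) (os + b)
  | _, _, _ => []

-- state transformation relating A's first loop on a :: b :: t to the loop on t
def phi (a b : Int) (st : List Int × List Int × Int × Int) : List Int × List Int × Int × Int :=
  (a :: st.1.map (a + ·), b :: st.2.1.map (b + ·), a + st.2.2.1, b + st.2.2.2)

theorem altGo_spec : ∀ (t : List Int) (ys os : Int) (res : List String),
    altGo t ys os res = res ++ spine t ys os
  | [], _, _, res => by simp [altGo, spine]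
  | [a], _, _, res => by simp [altGo, spine]
  | a :: b :: t, ys, os, res => by
      rw [altGo, spine, altGo_spec t]
      simp [vcmp]

theorem flA_pair (a b : Int) : flA [a, b] = ([a], [b], a, b) := by
  simp [flA, stepF, PySem.List.pyRange, PySem.List.pyGetD, PySem.List.pyGet?, PySem.List.pyIdx?,
    PySem.Int.mod]


theorem step_commute (a b : Int) (t : List Int) (st : List Int × List Int × Int × Int) (k : Nat) :
    stepF (a :: b :: t) (phi a b st) (3 + (k : Int)) = phi a b (stepF t st (1 + (k : Int))) := by
  have h3 : (3 + (k : Int)) = ((k + 3 : Nat) : Int) := by push_cast; ring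
  have h1 : (1 + (k : Int)) = ((k + 1 : Nat) : Int) := by push_cast; ring
  have hget : PySem.List.pyGetD (a :: b :: t) (3 + (k : Int)) 0
      = PySem.List.pyGetD t (1 + (k : Int)) 0 := by
    rw [h3, h1, PySem.List.pyGetD_natCast, PySem.List.pyGetD_natCast]
    simp [List.getD]
  have hmod : (PySem.Int.mod (3 + (k : Int)) 2 == 0) = (PySem.Int.mod (1 + (k : Int)) 2 == 0) := by
    rw [h3, h1]
    rw [show ((2:Int)) = ((2:Nat):Int) by norm_num, PySem.Int.mod_natCast, PySem.Int.mod_natCast]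
    have : (k + 3) % 2 = (k + 1) % 2 := by omega
    rw [this]
  unfold stepF
  rw [hget, hmod]
  cases h : (PySem.Int.mod (1 + (k : Int)) 2 == 0) <;> simp [phi, add_assoc]

theorem fold_shift (a b : Int) (t : List Int) :
    ∀ (l : List Nat) (st : List Int × List Int × Int × Int),
    (l.map (fun k : Nat => (3:Int) + (k:Int))).foldl (stepF (a :: b :: t)) (phi a b st)
      = phi a b ((l.map (fun k : Nat => (1:Int) + (k:Int))).foldl (stepF t) st)
  | [], st => rfl
  | k :: l, st => by
      simp only [List.map_cons, List.foldl_cons]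
      rw [step_commute, fold_shift a b t l]

theorem flA_cons (a b : Int) (t : List Int) (ht : t ≠ []) :
    flA (a :: b :: t) = phi a b (flA t) := by
  obtain ⟨c, t', rfl⟩ : ∃ c t', t = c :: t' := by
    cases t with | nil => exact absurd rfl ht | cons c t' => exact ⟨c, t', rfl⟩
  unfold flA
  have hlen : ((a :: b :: c :: t').length : Int) = ((c :: t').length : Int) + 2 := by
    push_cast [List.length_cons]; ring
  rw [hlen]
  set n : Int := ((c :: t').length : Int) with hn
  have hn1 : (1:Int) ≤ n := by rw [hn]; exact_mod_cast Nat.succ_le_of_lt (Nat.pos_of_ne_zero (by simp))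
  rw [PySem.List.pyRange_one_cons (by omega), PySem.List.pyRange_one_cons (by omega)]
  simp only [List.foldl_cons]
  have hstate : stepF (a :: b :: c :: t')
      (stepF (a :: b :: c :: t')
        ([PySem.List.pyGetD (a :: b :: c :: t') 0 0], [], PySem.List.pyGetD (a :: b :: c :: t') 0 0, 0) 1)
      (1 + 1)
      = phi a b ([PySem.List.pyGetD (c :: t') 0 0], [], PySem.List.pyGetD (c :: t') 0 0, 0) := by
    have hc1 : ((0:Int) ≤ (t'.length:Int) + 1 + 1) := by omega
    have hc2 : ((2:Int) ≤ (t'.length:Int) + 1 + 1) := by omega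
    have hc3 : ((0:Int) ≤ (t'.length:Int) + 1) := by omega
    simp [stepF, phi, PySem.List.pyGetD, PySem.List.pyGet?, PySem.List.pyIdx?, PySem.Int.mod,
      hc1, hc2, hc3]
  rw [hstate]
  have hr3 : PySem.List.pyRange (1 + 1 + 1) (n + 2) 1
      = (List.range (n - 1).toNat).map (fun k : Nat => (3:Int) + k) := by
    rw [show (1:Int) + 1 + 1 = 3 by norm_num, PySem.List.pyRange_one]
    have : (n + 2 - 3).toNat = (n - 1).toNat := by omega
    rw [this]
  have hr1 : PySem.List.pyRange 1 n 1
      = (List.range (n - 1).toNat).map (fun k : Nat => (1:Int) + k) := by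
    rw [PySem.List.pyRange_one]
  rw [hr3, hr1, fold_shift]

theorem range_getD_zip : ∀ (y o : List Int), y.length = o.length →
    (List.range y.length).map (fun k => vcmp (y.getD k 0) (o.getD k 0)) = List.zipWith vcmp y o
  | [], o, h => by simp
  | a :: y, [], h => by simp at h
  | a :: y, b :: o, h => by
      simp only [List.length_cons]
      rw [List.range_succ_eq_map]
      simp only [List.map_cons, List.map_map]
      rw [List.zipWith_cons_cons, ← range_getD_zip y o (by simpa using h)]
      simp [Function.comp, List.getD]

theorem f2A_eq (y o : List Int) (h : y.length = o.length) : f2A y o = List.zipWith vcmp y o := by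
  unfold f2A
  have hbody : ∀ (res : List String) (j : Int),
      (let r := if PySem.List.pyGetD y j 0 > PySem.List.pyGetD o j 0 then res ++ ["Y"] else res
       let r := if PySem.List.pyGetD y j 0 < PySem.List.pyGetD o j 0 then r ++ ["O"] else r
       if PySem.List.pyGetD y j 0 == PySem.List.pyGetD o j 0 then r ++ ["T"] else r)
      = res ++ [vcmp (PySem.List.pyGetD y j 0) (PySem.List.pyGetD o j 0)] := by
    intro res j
    rcases lt_trichotomy (PySem.List.pyGetD y j 0) (PySem.List.pyGetD o j 0) with hlt | heq | hgt
    · simp [vcmp, hlt, not_lt.mpr (le_of_lt hlt), ne_of_lt hlt]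
    · simp [vcmp, heq]
    · simp [vcmp, hgt, not_lt.mpr (le_of_lt hgt), (ne_of_lt hgt).symm]
  simp only [hbody]
  rw [PySem.List.foldl_append_singleton_eq_map]
  rw [PySem.List.pyRange_zero_natCast]
  simp only [List.map_map]
  rw [← range_getD_zip y o h]
  simp [Function.comp]

theorem flA_len : ∀ (t : List Int), t ≠ [] → t.length % 2 = 0 →
    (flA t).1.length = t.length / 2 ∧ (flA t).2.1.length = t.length / 2
  | [], h, _ => absurd rfl h
  | [a], _, he => by simp at he
  | [a, b], _, _ => by simp [flA_pair]
  | a :: b :: c :: t', _, he => by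
      have ih := flA_len (c :: t') (List.cons_ne_nil c t') (by simp at he ⊢; omega)
      rw [flA_cons a b (c :: t') (List.cons_ne_nil c t')]
      simp [phi, ih.1, ih.2]
      omega

theorem zip_vspine : ∀ (t : List Int), t ≠ [] → t.length % 2 = 0 → ∀ (ys os : Int),
    List.zipWith vcmp ((flA t).1.map (ys + ·)) ((flA t).2.1.map (os + ·)) = spine t ys os
  | [], h, _ => absurd rfl h
  | [a], _, he => by simp at he
  | [a, b], _, _ => by intro ys os; simp [flA_pair, spine]
  | a :: b :: c :: t', _, he => by
      intro ys os
      rw [flA_cons a b (c :: t') (List.cons_ne_nil c t')]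
      simp only [phi, List.map_cons, List.zipWith_cons_cons, List.map_map, spine]
      congr 1
      rw [← zip_vspine (c :: t') (List.cons_ne_nil c t') (by simp at he ⊢; omega) (ys + a) (os + b)]
      congr 1 <;> · apply List.map_congr_left; intro x _; simp [Function.comp]; ring

-- ===== VERDICT (by name: the statement is the Claim_ definition above) =====
theorem currently_winning_spec : Claim_equal_currently_winning := by
  intro scores _ hpre
  obtain ⟨hne, he⟩ := hpre
  unfold Spec_currently_winning currently_winning currently_winning_alt
  rw [f2A_eq _ _ (by rw [(flA_len scores hne he).1, (flA_len scores hne he).2]),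
      altGo_spec]
  have := zip_vspine scores hne he 0 0
  simpa using this

def currently_winning_raises : Claim_raises_currently_winning := by
  unfold Claim_raises_currently_winning
  constructor
  · intro scores _ hr hpre
    obtain ⟨hne, he⟩ := hpre
    rcases hr with h | h
    · exact hne h
    · omega
  · exact ⟨by decide, by decide, by decide⟩
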